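-- pv_equiv track=rewrite | github.com/GeoTseperkas/Python-Coderbyte_Exercises | Python - Coderbyte Exercises (Easy - Medium - Hard)/Coderbyte - Product Digits.py | ProductDigits
-- ===== SOURCE A (Python) =====
-- def ProductDigits(num):
--   pairs = []
--
--   for i in range(1, num+1):
--     if num%i == 0:
--       d = int(num/i)
--       pair = len(str(d)) + len(str(i))
--       pairs.append(pair)
--   return min(pairs)
-- ===== SOURCE B (Python) =====
-- def ProductDigits(num):
--   # O(sqrt(num)): scan i only while i*i <= num; each divisor i found there
--   # represents the pair (i, num//i), whose digit sum equals the pair's in A.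
--   best = None
--   i = 1
--   while i * i <= num:
--     if num % i == 0:
--       c = len(str(i)) + len(str(num // i))
--       if best is None or c < best:
--         best = c
--     i += 1
--   return best
-- ===== Notes on version B (the rewrite author's own statement) =====
-- stated objective: faster
-- what changed: B scans candidate divisors only while i*i <= num, keeping a running minimum of the digit-count of each pair (i, num//i), instead of A's full scan over every candidate up to num that builds a list of all pairs and takes min at the end; Pre_ excludes non-positive num, where A's min of an empty list raises ValueError.
import Mathlib
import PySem

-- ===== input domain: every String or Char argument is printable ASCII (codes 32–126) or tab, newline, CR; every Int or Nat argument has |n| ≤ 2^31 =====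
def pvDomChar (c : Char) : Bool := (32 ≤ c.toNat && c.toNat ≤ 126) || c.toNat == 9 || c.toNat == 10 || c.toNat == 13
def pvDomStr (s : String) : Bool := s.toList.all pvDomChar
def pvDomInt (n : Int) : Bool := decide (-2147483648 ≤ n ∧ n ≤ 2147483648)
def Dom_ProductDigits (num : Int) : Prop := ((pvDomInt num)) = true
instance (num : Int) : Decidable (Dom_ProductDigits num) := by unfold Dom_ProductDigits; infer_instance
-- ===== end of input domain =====

-- B replaces A's full 1..num divisor scan by a √num scan with a running minimum (asymptotically faster).

-- ===== PORT A =====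
def ProductDigits (num : Int) : Int :=
  let pairs : List Int :=
    (PySem.List.pyRange 1 (num + 1) 1).foldl (fun pairs i =>
      if PySem.Int.mod num i = 0 then
        -- int(num/i): float true division, exact here since i divides num and |num| ≤ 2^31 < 2^53
        let d := PySem.Int.floordiv num i
        let pair := PySem.Str.len (PySem.Int.toStr d) + PySem.Str.len (PySem.Int.toStr i)
        pairs ++ [pair]
      else pairs) []
  -- min(pairs) raises ValueError on []; Pre_ excludes non-positive num, the only inputs where pairs = []
  (PySem.List.min? pairs (fun x => x)).getD 0

-- ===== PORT B =====
-- 'if best is None or c < best: best = c'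
def pvMinStep (best : Option Int) (c : Int) : Option Int :=
  match best with
  | none => some c
  | some b => if c < b then some c else some b

-- the while loop of Source B; fuel only makes the recursion structural (num.toNat steps always suffice)
def pvAltLoop (num : Int) (fuel : Nat) (i : Int) (best : Option Int) : Option Int :=
  match fuel with
  | 0 => best
  | fuel + 1 =>
    if i * i ≤ num then
      let best :=
        if PySem.Int.mod num i = 0 then
          pvMinStep best (PySem.Str.len (PySem.Int.toStr i) +
                          PySem.Str.len (PySem.Int.toStr (PySem.Int.floordiv num i)))
        else best
      pvAltLoop num fuel (i + 1) best
    else best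

-- Source B returns None (no Int) for non-positive num; outside Pre_ — .getD 0 is never relied on inside Pre_
def ProductDigits_alt (num : Int) : Int :=
  (pvAltLoop num num.toNat 1 none).getD 0

-- ===== PRECONDITION & SPEC =====
-- Pre_ excludes non-positive num: there A's pairs list stays empty and min([]) raises ValueError.
def Pre_ProductDigits (num : Int) : Prop := 1 ≤ num
instance (num : Int) : Decidable (Pre_ProductDigits num) := by unfold Pre_ProductDigits; infer_instance
def pvWitness_ProductDigits : Int := 12

def Spec_ProductDigits (num : Int) (out : Int) : Prop := out = ProductDigits_alt num
instance (num : Int) (out : Int) : Decidable (Spec_ProductDigits num out) := by unfold Spec_ProductDigits; infer_instance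

-- ===== CLAIM (what is proved, stated in full; the proofs are below) =====
def Claim_equal_ProductDigits : Prop := ∀ (num : Int), Dom_ProductDigits num → Pre_ProductDigits num → Spec_ProductDigits num (ProductDigits num)

-- ===== LEMMAS AND PROOFS =====

-- digit-count of the pair (i, num//i), written as A writes it
def pvF (num i : Int) : Int :=
  PySem.Str.len (PySem.Int.toStr (PySem.Int.floordiv num i)) + PySem.Str.len (PySem.Int.toStr i)

-- digit-count of the pair as B writes it
def pvG (num i : Int) : Int :=
  PySem.Str.len (PySem.Int.toStr i) + PySem.Str.len (PySem.Int.toStr (PySem.Int.floordiv num i))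

theorem pvF_eq_pvG (num i : Int) : pvF num i = pvG num i := by
  unfold pvF pvG; ring

-- the list of candidate values B's while loop visits
def pvCands (num : Int) (fuel : Nat) (i : Int) : List Int :=
  match fuel with
  | 0 => []
  | fuel + 1 =>
    if i * i ≤ num then
      (if PySem.Int.mod num i = 0 then [pvG num i] else []) ++ pvCands num fuel (i + 1)
    else []

theorem pvAltLoop_eq_foldl (num : Int) (fuel : Nat) (i : Int) (best : Option Int) :
    pvAltLoop num fuel i best = (pvCands num fuel i).foldl pvMinStep best := by
  induction fuel generalizing i best with
  | zero => rfl
  | succ fuel ih =>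
    unfold pvAltLoop pvCands
    split_ifs with h1 h2
    · simp [ih, pvG]
    · simp [ih]
    · rfl

theorem pvMinStep_some (b c : Int) : pvMinStep (some b) c = some (min b c) := by
  unfold pvMinStep
  rcases (by omega : c < b ∨ b ≤ c) with h | h
  · simp [h, min_eq_right h.le]
  · simp [not_lt.mpr h, min_eq_left h]

theorem foldl_pvMinStep_some (l : List Int) (b : Int) :
    l.foldl pvMinStep (some b) = some (l.foldl min b) := by
  induction l generalizing b with
  | nil => rfl
  | cons x t ih => simp only [List.foldl_cons, pvMinStep_some, ih]

theorem foldl_pvMinStep_none_eq_min? (l : List Int) :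
    l.foldl pvMinStep none = PySem.List.min? l (fun x => x) := by
  cases l with
  | nil => rfl
  | cons x t =>
    simp only [List.foldl_cons, pvMinStep, foldl_pvMinStep_some]
    rw [PySem.List.min?_id_cons]


theorem mem_pvCands (num : Int) (fuel : Nat) (i : Int) (hi : 1 ≤ i)
    (hfuel : num < (i + fuel) * (i + fuel)) (x : Int) :
    x ∈ pvCands num fuel i ↔ ∃ j, i ≤ j ∧ j * j ≤ num ∧ PySem.Int.mod num j = 0 ∧ x = pvG num j := by
  induction fuel generalizing i with
  | zero =>
    simp only [pvCands, List.not_mem_nil, false_iff]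
    rintro ⟨j, hij, hj2, -, -⟩
    have : i * i ≤ j * j := by nlinarith
    simp at hfuel; nlinarith
  | succ fuel ih =>
    have hfuel' : num < (i + 1 + fuel) * (i + 1 + fuel) := by
      have : (i + (fuel + 1 : Nat)) = i + 1 + (fuel : Int) := by push_cast; ring
      rw [this] at hfuel; exact hfuel
    unfold pvCands
    split_ifs with h1 h2
    · -- i*i ≤ num, i divides num
      simp only [List.mem_append, List.mem_singleton, ih (i + 1) (by omega) hfuel']
      constructor
      · rintro (rfl | ⟨j, hij, hj2, hjd, rfl⟩)
        · exact ⟨i, le_refl i, h1, h2, rfl⟩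
        · exact ⟨j, by omega, hj2, hjd, rfl⟩
      · rintro ⟨j, hij, hj2, hjd, rfl⟩
        rcases eq_or_lt_of_le hij with rfl | hlt
        · exact Or.inl rfl
        · exact Or.inr ⟨j, by omega, hj2, hjd, rfl⟩
    · simp only [List.nil_append, ih (i + 1) (by omega) hfuel']
      constructor
      · rintro ⟨j, hij, hj2, hjd, rfl⟩
        exact ⟨j, by omega, hj2, hjd, rfl⟩
      · rintro ⟨j, hij, hj2, hjd, rfl⟩
        rcases eq_or_lt_of_le hij with rfl | hlt
        · exact absurd hjd h2
        · exact ⟨j, by omega, hj2, hjd, rfl⟩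
    · -- num < i*i : no j ≥ i qualifies
      simp only [List.not_mem_nil, false_iff]
      rintro ⟨j, hij, hj2, -, -⟩
      have h2 : i * i ≤ j * j := by nlinarith
      linarith

-- first extremal values of two lists with the same members agree
theorem min?_id_congr_mem (l₁ l₂ : List Int) (h : ∀ x, x ∈ l₁ ↔ x ∈ l₂) :
    PySem.List.min? l₁ (fun x => x) = PySem.List.min? l₂ (fun x => x) := by
  cases h1 : PySem.List.min? l₁ (fun x => x) with
  | none =>
    rw [PySem.List.min?_eq_none_iff] at h1
    subst h1
    cases h2 : PySem.List.min? l₂ (fun x => x) with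
    | none => rfl
    | some m =>
      have := PySem.List.min?_mem h2
      exact absurd ((h m).mpr this) (List.not_mem_nil)
  | some m =>
    cases h2 : PySem.List.min? l₂ (fun x => x) with
    | none =>
      rw [PySem.List.min?_eq_none_iff] at h2
      subst h2
      have := PySem.List.min?_mem h1
      exact absurd ((h m).mp this) (List.not_mem_nil)
    | some m' =>
      have hm : m ∈ l₁ := PySem.List.min?_mem h1
      have hm' : m' ∈ l₂ := PySem.List.min?_mem h2
      have h12 : m' ≤ m := PySem.List.min?_isMin h2 m ((h m).mp hm)
      have h21 : m ≤ m' := PySem.List.min?_isMin h1 m' ((h m').mpr hm')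
      exact congrArg some (le_antisymm h21 h12)

theorem dvd_of_mod_eq_zero' (num j : Int) (_hj : 1 ≤ j) (h : PySem.Int.mod num j = 0) : j ∣ num :=
  (PySem.Int.mod_eq_zero_iff_dvd num j).mp h

theorem mod_eq_zero_of_dvd' (num j : Int) (_hj : 1 ≤ j) (h : j ∣ num) : PySem.Int.mod num j = 0 :=
  (PySem.Int.mod_eq_zero_iff_dvd num j).mpr h

-- the mathematical heart: the two candidate lists have the same members
theorem mem_iff_mem (num : Int) (hnum : 1 ≤ num) (x : Int) :
    (∃ i, 1 ≤ i ∧ i < num + 1 ∧ PySem.Int.mod num i = 0 ∧ x = pvF num i) ↔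
    (∃ j, 1 ≤ j ∧ j * j ≤ num ∧ PySem.Int.mod num j = 0 ∧ x = pvG num j) := by
  constructor
  · rintro ⟨i, hi1, hi2, hid, rfl⟩
    rcases lt_or_ge num (i * i) with hbig | hsmall
    · -- mirror divisor q = num // i
      obtain ⟨q, hq⟩ := dvd_of_mod_eq_zero' num i hi1 hid
      have hqdiv : PySem.Int.floordiv num i = q := by
        rw [PySem.Int.floordiv_eq_ediv_of_pos (by omega), hq]
        exact Int.mul_ediv_cancel_left q (by omega)
      have hq1 : 1 ≤ q := by nlinarith
      have hqi : q < i := by nlinarith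
      refine ⟨q, hq1, by nlinarith, mod_eq_zero_of_dvd' num q hq1 ⟨i, by rw [hq]; ring⟩, ?_⟩
      have hdq : PySem.Int.floordiv num q = i := by
        rw [PySem.Int.floordiv_eq_ediv_of_pos (by omega), hq]
        exact Int.mul_ediv_cancel i (by omega)
      unfold pvF pvG
      rw [hqdiv, hdq]
    · exact ⟨i, hi1, hsmall, hid, pvF_eq_pvG num i⟩
  · rintro ⟨j, hj1, hj2, hjd, rfl⟩
    have hjn : j < num + 1 := by nlinarith
    exact ⟨j, hj1, hjn, hjd, (pvF_eq_pvG num j).symm⟩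

theorem fuel_big (num : Int) (hnum : 1 ≤ num) : num < (1 + (num.toNat : Int)) * (1 + (num.toNat : Int)) := by
  have : (num.toNat : Int) = num := Int.toNat_of_nonneg (by omega)
  nlinarith

-- ===== VERDICT (by name: the statement is the Claim_ definition above) =====
theorem ProductDigits_spec : Claim_equal_ProductDigits := by
  intro num _ hpre
  unfold Spec_ProductDigits ProductDigits ProductDigits_alt
  simp only []
  rw [PySem.List.foldl_append_ite (p := fun i => PySem.Int.mod num i = 0)
    (f := fun i => PySem.Str.len (PySem.Int.toStr (PySem.Int.floordiv num i)) +
                   PySem.Str.len (PySem.Int.toStr i)), pvAltLoop_eq_foldl, foldl_pvMinStep_none_eq_min?]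
  simp only [List.nil_append]
  have hmap : (fun i : Int => PySem.Str.len (PySem.Int.toStr (PySem.Int.floordiv num i)) +
      PySem.Str.len (PySem.Int.toStr i)) = fun i => pvF num i := rfl
  rw [hmap]
  congr 1
  apply min?_id_congr_mem
  intro x
  rw [mem_pvCands num num.toNat 1 (by omega) (fuel_big num hpre) x]
  simp only [List.mem_map, List.mem_filter, PySem.List.mem_pyRange_one, decide_eq_true_eq]
  constructor
  · rintro ⟨i, ⟨⟨hi1, hi2⟩, hid⟩, rfl⟩
    obtain ⟨j, hj1, hj2, hjd, hx⟩ := (mem_iff_mem num hpre (pvF num i)).mp ⟨i, hi1, hi2, hid, rfl⟩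
    exact ⟨j, hj1, hj2, hjd, hx⟩
  · rintro ⟨j, hj1, hj2, hjd, rfl⟩
    obtain ⟨i, hi1, hi2, hid, hx⟩ := (mem_iff_mem num hpre (pvG num j)).mpr ⟨j, hj1, hj2, hjd, rfl⟩
    exact ⟨i, ⟨⟨hi1, hi2⟩, hid⟩, hx.symm⟩
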